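-- pv_equiv track=rewrite | github.com/tigermint/Algorithm | 프로그래머스/Lv.2/17687. ［3차］ n진수 게임/［3차］ n진수 게임.py | solution
-- ===== SOURCE A (Python) =====
-- def convert(num, n):
--     digit = "0123456789ABCDEF"
--     res = ""
--     if num == 0:
--         return '0'
--     while num > 0:
--         num, mod = divmod(num, n) # 계속 나누고, 나머지 index는 결과에 넣어주기
--         res += digit[mod]
--     return res[::-1]
--
-- def solution(n, t, m, p):
--     answer = ''
--     s = ''
--     # 최대 경우 문자열 생성
--     for i in range(t * m):
--         s += convert(i, n)
--
--     # p 부터, m 순서로 t만큼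
--     p -= 1
--     while len(answer) < t:
--         answer += s[p]; p += m
--
--     return answer
-- ===== SOURCE B (Python) =====
-- DIGITS = "0123456789ABCDEF"
--
-- def _digits(i, n):
--     # MSB-first digit characters of i in base n ('0' for i == 0)
--     if i == 0:
--         return ['0']
--     ds = []
--     def rec(j):
--         if j == 0:
--             return
--         q, r = divmod(j, n)
--         rec(q)
--         ds.append(DIGITS[r])
--     rec(i)
--     return ds
--
-- def solution(n, t, m, p):
--     # one fused pass: generate the base-n stream digit by digit and pick
--     # every m-th position starting at p-1, never building the full string
--     answer = []
--     pos = 0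
--     nxt = p - 1
--     i = 0
--     while len(answer) < t:
--         for d in _digits(i, n):
--             if len(answer) < t and pos == nxt:
--                 answer.append(d)
--                 nxt += m
--             pos += 1
--         i += 1
--     return ''.join(answer)
-- ===== Notes on version B (the rewrite author's own statement) =====
-- stated objective: alternative
-- what changed: B fuses digit generation with selection in a single index-tracking scan (recursive MSB-first digit helper, global position counter and moving target), instead of A's two-phase build-the-whole-string-then-index-into-it structure; B never materialises the concatenated string and stops generating as soon as t digits are picked.
-- outside the precondition, e.g. on solution(2, 1, 2, 0): A returns '1', B does not finish within the time limit; on solution(2, 3, 2, 3): A returns '111', B returns '111'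
import Mathlib
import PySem

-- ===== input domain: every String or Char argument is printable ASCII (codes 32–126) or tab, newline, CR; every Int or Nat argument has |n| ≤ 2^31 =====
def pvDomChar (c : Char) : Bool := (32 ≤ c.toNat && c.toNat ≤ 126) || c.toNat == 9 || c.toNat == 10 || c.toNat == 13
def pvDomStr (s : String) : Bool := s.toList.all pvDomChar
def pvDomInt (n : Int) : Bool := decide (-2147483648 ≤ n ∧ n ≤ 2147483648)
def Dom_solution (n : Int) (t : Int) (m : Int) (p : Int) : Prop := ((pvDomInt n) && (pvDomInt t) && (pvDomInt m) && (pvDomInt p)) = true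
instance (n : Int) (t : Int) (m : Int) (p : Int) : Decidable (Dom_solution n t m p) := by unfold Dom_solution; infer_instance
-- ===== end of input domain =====

-- B fuses digit generation with selection in one index-tracking scan instead of A's
-- build-the-full-string-then-index two-phase structure (objective: alternative, same asymptotic cost).


-- ===== PORT A =====
-- digit table "0123456789ABCDEF" (shared literal constant of both Pythons)
def pvDigits16 : List Char :=
  ['0','1','2','3','4','5','6','7','8','9','A','B','C','D','E','F']

-- A's 'while num > 0: num, mod = divmod(num, n); res += digit[mod]' (fuel makes the loop total;
-- inside Pre_ the fuel num.toNat+1 is never exhausted since num strictly decreases for n ≥ 2)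
def pvConvLoop : Nat → Int → Int → List Char → List Char
  | 0, _, _, res => res
  | fuel+1, num, n, res =>
    if 0 < num then
      match PySem.Int.divmod? num n with
      | some (q, r) => pvConvLoop fuel q n (res ++ [(PySem.List.pyGet? pvDigits16 r).getD '?'])
      | none => res       -- Python raises ZeroDivisionError here (n = 0, outside Pre_)
    else res

-- A's convert(num, n), on List Char (strings are ported through List Char per PySem convention)
def pvConvertChars (num : Int) (n : Int) : List Char :=
  if num = 0 then ['0'] else (pvConvLoop (num.toNat + 1) num n []).reverse

-- A's 'while len(answer) < t: answer += s[p]; p += m' (exactly t.toNat iterations add one char each;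
-- s[p] raises IndexError out of range — pyGetD is exact only under Pre_)
def pvWhileA (s : List Char) (t : Int) (m : Int) : Nat → Int → List Char → List Char
  | 0, _, ans => ans
  | fuel+1, p, ans =>
    if (ans.length : Int) < t then
      pvWhileA s t m fuel (p + m) (ans ++ [PySem.List.pyGetD s p '?'])
    else ans

def solution (n : Int) (t : Int) (m : Int) (p : Int) : String :=
  let s := (PySem.List.pyRange 0 (t*m) 1).foldl (fun acc i => acc ++ pvConvertChars i n) []
  String.ofList (pvWhileA s t m t.toNat (p - 1) [])

-- ===== PORT B =====
-- Source B's rec(j): MSB-first digits, recursion on j // n (fuel = j.toNat+1, never exhausted for n ≥ 2)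
def pvDigRec : Nat → Int → Int → List Char
  | 0, _, _ => []
  | fuel+1, j, n =>
    if j = 0 then []
    else
      match PySem.Int.divmod? j n with
      | some (q, r) => pvDigRec fuel q n ++ [(PySem.List.pyGet? pvDigits16 r).getD '?']
      | none => []        -- Python raises ZeroDivisionError here (n = 0, outside Pre_)

-- Source B's _digits(i, n)
def pvDigitsB (i : Int) (n : Int) : List Char :=
  if i = 0 then ['0'] else pvDigRec (i.toNat + 1) i n

-- Source B's inner 'for d in _digits(i, n): …' over (answer, pos, nxt)
def pvInnerB (t : Int) (m : Int) : List Char → Int → Int → List Char → (List Char × Int × Int)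
  | [], pos, nxt, ans => (ans, pos, nxt)
  | d :: ds, pos, nxt, ans =>
    if (ans.length : Int) < t ∧ pos = nxt then
      pvInnerB t m ds (pos + 1) (nxt + m) (ans ++ [d])
    else
      pvInnerB t m ds (pos + 1) nxt ans

-- Source B's outer 'while len(answer) < t' (fuel (p+t*m).toNat+1 outer rounds suffice whenever the
-- Python loop terminates: every integer contributes at least one digit and the last picked
-- position is p-1+(t-1)*m < p+t*m)
def pvLoopB (n : Int) (t : Int) (m : Int) : Nat → Int → Int → Int → List Char → List Char
  | 0, _, _, _, ans => ans
  | fuel+1, i, pos, nxt, ans =>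
    if (ans.length : Int) < t then
      let r := pvInnerB t m (pvDigitsB i n) pos nxt ans
      pvLoopB n t m fuel (i + 1) r.2.1 r.2.2 r.1
    else ans

def solution_alt (n : Int) (t : Int) (m : Int) (p : Int) : String :=
  String.ofList (pvLoopB n t m ((p + t*m).toNat + 1) 0 0 (p - 1) [])

-- ===== PRECONDITION & SPEC =====
-- Pre_ admits the problem's natural domain (2 ≤ base ≤ 16, t ≥ 0, 1 ≤ p ≤ m), plus n ≥ 17 when
-- t*m ≤ 16 (every generated digit then still fits the 16-entry table), plus the trivial region
-- t ≤ 0 where both programs return '' (for t ≤ 0 A still builds its string first, so n must be a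
-- base it can convert with unless the range t*m is empty). Outside it A raises IndexError
-- (a digit ≥ 16, or p beyond the built string), ZeroDivisionError (n = 0) or loops forever (n ≤ 1);
-- for p ≤ 0 A returns a value only via Python's negative-index wraparound, an accident of the
-- build-then-slice shape that B's forward scan never reaches, and for p > m A returns a value only
-- when the accidental surplus of multi-digit numbers makes the built string long enough (B then
-- returns the same value, but that corner is not claimed).
def Pre_solution (n : Int) (t : Int) (m : Int) (p : Int) : Prop :=
  (2 ≤ n ∧ (n ≤ 16 ∨ t * m ≤ 16) ∧ 0 ≤ t ∧ 1 ≤ m ∧ 1 ≤ p ∧ p ≤ m)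
    ∨ (t ≤ 0 ∧ (t * m ≤ 0 ∨ (2 ≤ n ∧ (n ≤ 16 ∨ t * m ≤ 16))))
instance (n : Int) (t : Int) (m : Int) (p : Int) : Decidable (Pre_solution n t m p) := by
  unfold Pre_solution; infer_instance

def pvWitness_solution : Int × Int × Int × Int := (2, 4, 2, 1)

def Spec_solution (n : Int) (t : Int) (m : Int) (p : Int) (out : String) : Prop := out = solution_alt n t m p
instance (n : Int) (t : Int) (m : Int) (p : Int) (out : String) : Decidable (Spec_solution n t m p out) := by
  unfold Spec_solution; infer_instance

-- ===== CLAIM (what is proved, stated in full; the proofs are below) =====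
def Claim_equal_solution : Prop := ∀ (n : Int) (t : Int) (m : Int) (p : Int), Dom_solution n t m p → Pre_solution n t m p → Spec_solution n t m p (solution n t m p)

-- ===== LEMMAS AND PROOFS =====

-- the infinite digit stream, truncated to the first k integers
def pvStream (n : Int) (k : Nat) : List Char :=
  (List.range k).flatMap (fun (i : Nat) => pvDigitsB (i : Int) n)

theorem pvDivmod_eq (a b : Int) (hb : b ≠ 0) :
    PySem.Int.divmod? a b = some (PySem.Int.floordiv a b, PySem.Int.mod a b) := by
  simp [PySem.Int.divmod?, PySem.Int.floordiv, PySem.Int.mod, hb]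

theorem pvFloordiv_nonneg (a b : Int) (hb : 0 < b) (ha : 0 ≤ a) : 0 ≤ PySem.Int.floordiv a b := by
  rw [PySem.Int.floordiv_eq_ediv_of_pos hb]; positivity

-- A's convert loop = reversed MSB-first digits (same fuel on both sides)
theorem pvConvLoop_eq_digRec (fuel : Nat) (n : Int) (hn : 0 < n) :
    ∀ (num : Int) (res : List Char), 0 ≤ num →
      pvConvLoop fuel num n res = res ++ (pvDigRec fuel num n).reverse := by
  induction fuel with
  | zero => intro num res _; simp [pvConvLoop, pvDigRec]
  | succ fuel ih =>
    intro num res hnum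
    by_cases h0 : 0 < num
    · have hne : num ≠ 0 := by omega
      rw [pvConvLoop, pvDigRec, if_pos h0, if_neg hne, pvDivmod_eq _ _ (by omega)]
      dsimp only
      rw [ih _ _ (pvFloordiv_nonneg _ _ hn hnum)]
      simp
    · have hz : num = 0 := by omega
      subst hz
      rw [pvConvLoop, pvDigRec]
      simp

theorem pvConvertChars_eq_digitsB (num n : Int) (hn : 0 < n) (h : 0 ≤ num) :
    pvConvertChars num n = pvDigitsB num n := by
  unfold pvConvertChars pvDigitsB
  by_cases hz : num = 0
  · simp [hz]
  · rw [if_neg hz, if_neg hz, pvConvLoop_eq_digRec _ _ hn _ _ h]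
    simp

theorem pvDigitsB_ne_nil (i n : Int) (hn : 0 < n) : pvDigitsB i n ≠ [] := by
  unfold pvDigitsB
  by_cases hz : i = 0
  · simp [hz]
  · rw [if_neg hz]
    rw [pvDigRec, if_neg hz, pvDivmod_eq _ _ (by omega)]
    dsimp only
    simp

theorem pvStream_length (n : Int) (hn : 0 < n) (k : Nat) : k ≤ (pvStream n k).length := by
  induction k with
  | zero => simp [pvStream]
  | succ k ih =>
    have hne := pvDigitsB_ne_nil (k : Int) n hn
    have : 1 ≤ (pvDigitsB (k : Int) n).length := by
      cases hd : pvDigitsB (k : Int) n with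
      | nil => exact absurd hd hne
      | cons a l => simp
    simp only [pvStream, List.range_succ, List.flatMap_append, List.flatMap_cons,
      List.flatMap_nil, List.append_nil, List.length_append]
    simp only [pvStream] at ih
    omega

theorem pvStream_prefix (n : Int) {k K : Nat} (h : k ≤ K) : pvStream n k <+: pvStream n K := by
  induction K with
  | zero => simp_all [pvStream]
  | succ K ih =>
    rcases Nat.lt_or_ge k (K+1) with hlt | hge
    · refine (ih (by omega)).trans ?_
      simp only [pvStream, List.range_succ, List.flatMap_append]
      exact List.prefix_append _ _
    · have : k = K + 1 := by omega
      subst this; exact List.prefix_refl _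

theorem pvS_eq_stream (n b : Int) (hn : 0 < n) :
    (PySem.List.pyRange 0 b 1).foldl (fun acc i => acc ++ pvConvertChars i n) []
      = pvStream n b.toNat := by
  rw [PySem.List.foldl_append_eq_flatMap, PySem.List.pyRange_one]
  simp only [List.nil_append, pvStream, List.flatMap_map, sub_zero, zero_add]
  exact List.flatMap_congr (fun a _ => pvConvertChars_eq_digitsB _ n hn (by positivity))

theorem pvWhileA_eq_map (s : List Char) (t m : Int) :
    ∀ (k : Nat) (q : Int) (ans : List Char), (ans.length : Int) + k = t →
      pvWhileA s t m k q ans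
        = ans ++ (List.range k).map (fun (j : Nat) => PySem.List.pyGetD s (q + (j : Int) * m) '?') := by
  intro k
  induction k with
  | zero => intro q ans _; simp [pvWhileA]
  | succ k ih =>
    intro q ans h
    rw [pvWhileA, if_pos (by omega)]
    rw [ih (q + m) (ans ++ [PySem.List.pyGetD s q '?']) (by simp; omega)]
    rw [List.range_succ_eq_map]
    simp only [List.map_cons, List.map_map, Nat.cast_zero, zero_mul, add_zero,
      List.append_assoc, List.singleton_append]
    congr 2
    apply List.map_congr_left
    intro j _
    simp only [Function.comp_apply]
    congr 1
    push_cast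
    ring

theorem pvInnerB_append (t m : Int) (cs : List Char) :
    ∀ (ds : List Char) (pos nxt : Int) (ans : List Char),
      pvInnerB t m (cs ++ ds) pos nxt ans
        = pvInnerB t m ds (pvInnerB t m cs pos nxt ans).2.1 (pvInnerB t m cs pos nxt ans).2.2
            (pvInnerB t m cs pos nxt ans).1 := by
  induction cs with
  | nil => intro ds pos nxt ans; simp [pvInnerB]
  | cons d cs ih =>
    intro ds pos nxt ans
    simp only [List.cons_append, pvInnerB]
    by_cases hc : ((ans.length : Int) < t ∧ pos = nxt)
    · rw [if_pos hc, if_pos hc, ih]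
    · rw [if_neg hc, if_neg hc, ih]

theorem pvInnerB_full (t m : Int) (cs : List Char) :
    ∀ (pos nxt : Int) (ans : List Char), t ≤ (ans.length : Int) →
      pvInnerB t m cs pos nxt ans = (ans, pos + cs.length, nxt) := by
  induction cs with
  | nil => intro pos nxt ans _; simp [pvInnerB]
  | cons d cs ih =>
    intro pos nxt ans h
    rw [pvInnerB, if_neg (by rintro ⟨h1, -⟩; omega), ih _ _ _ h]
    simp only [List.length_cons, Prod.mk.injEq, true_and, and_true]
    push_cast
    ring

-- splitting the head integer off a digit segment
theorem pvSeg_succ (n i : Int) (fuel : Nat) :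
    (List.range (fuel+1)).flatMap (fun (k : Nat) => pvDigitsB (i + (k : Int)) n)
      = pvDigitsB i n ++ (List.range fuel).flatMap (fun (k : Nat) => pvDigitsB ((i+1) + (k : Int)) n) := by
  rw [List.range_succ_eq_map]
  simp only [List.flatMap_cons, Nat.cast_zero, add_zero, List.flatMap_map]
  congr 1
  apply List.flatMap_congr
  intro k _
  show pvDigitsB (i + ((k : Nat) + 1 : Nat)) n = pvDigitsB ((i + 1) + (k : Int)) n
  congr 1
  push_cast
  ring

theorem pvLoopB_eq_innerB (n t m : Int) :
    ∀ (fuel : Nat) (i pos nxt : Int) (ans : List Char),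
      pvLoopB n t m fuel i pos nxt ans
        = (pvInnerB t m ((List.range fuel).flatMap (fun (k : Nat) => pvDigitsB (i + (k : Int)) n))
            pos nxt ans).1 := by
  intro fuel
  induction fuel with
  | zero => intro i pos nxt ans; simp [pvLoopB, pvInnerB]
  | succ fuel ih =>
    intro i pos nxt ans
    rw [pvLoopB]
    by_cases hc : (ans.length : Int) < t
    · rw [if_pos hc]
      dsimp only
      rw [ih, pvSeg_succ, pvInnerB_append]
    · rw [if_neg hc, pvInnerB_full t m _ _ _ _ (by omega)]

theorem pvInnerB_spec (t m : Int) (hm : 1 ≤ m) :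
    ∀ (cs : List Char) (k : Nat) (pos nxt : Int) (ans : List Char),
      pos ≤ nxt → (ans.length : Int) + k = t →
      (k ≠ 0 → nxt + ((k : Int) - 1) * m < pos + cs.length) →
      (pvInnerB t m cs pos nxt ans).1
        = ans ++ (List.range k).map (fun (j : Nat) => cs.getD (nxt - pos + (j : Int) * m).toNat '?') := by
  intro cs
  induction cs with
  | nil =>
    intro k pos nxt ans h1 h2 h3
    have hk : k = 0 := by
      by_contra hne
      have hb := h3 hne
      have hmul : 0 ≤ ((k : Int) - 1) * m := mul_nonneg (by omega) (by omega)
      simp only [List.length_nil, Nat.cast_zero, add_zero] at hb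
      omega
    subst hk
    simp [pvInnerB]
  | cons d cs ih =>
    intro k pos nxt ans h1 h2 h3
    match k with
    | 0 => rw [pvInnerB_full t m _ _ _ _ (by omega)]; simp
    | k' + 1 =>
      have hlt : (ans.length : Int) < t := by push_cast at h2; omega
      by_cases hpn : pos = nxt
      · subst hpn
        rw [pvInnerB, if_pos ⟨hlt, rfl⟩]
        rw [ih k' (pos + 1) (pos + m) (ans ++ [d]) (by omega) (by simp; push_cast at h2; omega)
          (by
            intro hk'
            have hb := h3 (by omega)
            simp only [List.length_cons] at hb
            push_cast at hb
            linarith)]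
        rw [List.range_succ_eq_map]
        simp only [List.map_cons, List.map_map, Nat.cast_zero, zero_mul, sub_self,
          zero_add, Int.toNat_zero, List.getD_cons_zero, List.append_assoc, List.singleton_append]
        congr 2
        apply List.map_congr_left
        intro j _
        simp only [Function.comp_apply]
        have hjm : 0 ≤ (j : Int) * m := mul_nonneg (by positivity) (by omega)
        have e1 : ((j : Int) + 1) * m = m + (j : Int) * m := by ring
        have e2 : ((((j : Nat) + 1 : Nat)) : Int) * m = m + (j : Int) * m := by push_cast; ring
        have e3 : (((((j : Nat) + 1 : Nat)) : Int) * m).toNat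
            = (pos + m - (pos + 1) + (j : Int) * m).toNat + 1 := by
          rw [e2]; omega
        rw [e3, List.getD_cons_succ]
      · have hlt2 : pos < nxt := lt_of_le_of_ne h1 hpn
        rw [pvInnerB, if_neg (by rintro ⟨-, h⟩; omega)]
        rw [ih (k' + 1) (pos + 1) nxt ans (by omega) h2
          (by
            intro _
            have hb := h3 (by omega)
            simp only [List.length_cons] at hb
            push_cast at hb ⊢
            linarith)]
        congr 1
        apply List.map_congr_left
        intro j _
        have hjm : 0 ≤ (j : Int) * m := mul_nonneg (by positivity) (by omega)
        have e3 : (nxt - pos + (j : Int) * m).toNat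
            = (nxt - (pos + 1) + (j : Int) * m).toNat + 1 := by omega
        rw [e3, List.getD_cons_succ]

-- ===== VERDICT (by name: the statement is the Claim_ definition above) =====
theorem solution_spec : Claim_equal_solution := by
  unfold Claim_equal_solution Spec_solution
  intro n t m p _dom hpre
  rcases hpre with ⟨hn2, -, ht, hm, hp1, hpm⟩ | ⟨ht, -⟩
  · have htm : 0 ≤ t * m := mul_nonneg ht (by omega)
    have hKcast : (((t*m).toNat : Int)) = t * m := Int.toNat_of_nonneg htm
    have hptm : 0 ≤ p + t * m := by omega
    simp only [solution, solution_alt]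
    congr 1
    rw [pvS_eq_stream n (t*m) (by omega)]
    rw [pvWhileA_eq_map _ t m t.toNat (p-1) [] (by simp [Int.toNat_of_nonneg ht])]
    rw [pvLoopB_eq_innerB]
    have hseg : (List.range ((p + t*m).toNat + 1)).flatMap
        (fun (k : Nat) => pvDigitsB ((0:Int) + (k : Int)) n) = pvStream n ((p + t*m).toNat + 1) := by
      simp [pvStream]
    rw [hseg]
    have hlen : ((p + t*m).toNat + 1 : Nat) ≤ (pvStream n ((p + t*m).toNat + 1)).length :=
      pvStream_length n (by omega) _
    have hlenA : ((t*m).toNat : Nat) ≤ (pvStream n (t*m).toNat).length :=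
      pvStream_length n (by omega) _
    rw [pvInnerB_spec t m hm _ t.toNat 0 (p-1) [] (by omega) (by simp [Int.toNat_of_nonneg ht])
      (by
        intro hk
        have e1 : ((t.toNat : Int) - 1) * m = t * m - m := by rw [Int.toNat_of_nonneg ht]; ring
        rw [e1]
        omega)]
    simp only [List.nil_append]
    apply List.map_congr_left
    intro j hj
    have hj' : (j : Int) ≤ t - 1 := by
      have := List.mem_range.mp hj
      omega
    have hjm : 0 ≤ (j : Int) * m := mul_nonneg (by positivity) (by omega)
    have hjm2 : (j : Int) * m ≤ (t - 1) * m := mul_le_mul_of_nonneg_right hj' (by omega)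
    have e2 : (t - 1) * m = t * m - m := by ring
    have hidx : p - 1 + (j : Int) * m < t * m := by omega
    have hidx0 : 0 ≤ p - 1 + (j : Int) * m := by omega
    -- A side: pyGetD on the shorter stream
    rw [PySem.List.pyGetD_eq_getElem _ _ hidx0 (by omega)]
    -- B side: getD on the longer stream
    have hbi : (p - 1 - 0 + (j : Int) * m).toNat < (pvStream n ((p + t*m).toNat + 1)).length := by
      omega
    rw [List.getD_eq_getElem _ _ hbi]
    -- the shorter stream is a prefix of the longer: indices agree below its length
    have hi : (p - 1 + (j : Int) * m).toNat < (pvStream n (t*m).toNat).length := by omega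
    have hab : (p - 1 - 0 + (j : Int) * m).toNat = (p - 1 + (j : Int) * m).toNat := by omega
    obtain ⟨tl, heq⟩ := pvStream_prefix n (show (t*m).toNat ≤ (p + t*m).toNat + 1 by omega)
    have h1 : (pvStream n ((p + t*m).toNat + 1))[(p - 1 - 0 + (j : Int) * m).toNat]?
        = some ((pvStream n (t*m).toNat)[(p - 1 + (j : Int) * m).toNat]'hi) := by
      rw [← heq, hab, List.getElem?_append_left hi]
      exact List.getElem?_eq_getElem hi
    have h2 : (pvStream n ((p + t*m).toNat + 1))[(p - 1 - 0 + (j : Int) * m).toNat]?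
        = some ((pvStream n ((p + t*m).toNat + 1))[(p - 1 - 0 + (j : Int) * m).toNat]'hbi) :=
      List.getElem?_eq_getElem hbi
    rw [h2] at h1
    exact (Option.some.inj h1).symm
  · -- trivial region: t ≤ 0, both selection loops run zero times and produce the empty string
    have h0 : t.toNat = 0 := by omega
    simp only [solution, solution_alt, h0]
    rw [pvWhileA, pvLoopB, if_neg (by simp; omega)]
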